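-- pv_equiv track=rewrite | github.com/devinalvaro/undepress | web/app/api/detection/__init__.py | sum_predictions
-- ===== SOURCE A (Python) =====
-- def sum_predictions(predictions, include_all=False):
--     predictions_sum = [0 for _ in range(9)]
--     for prediction in predictions:
--         if include_all or int(prediction[0]):
--             predictions_sum = [
--                 a + int(b) for a, b in zip(predictions_sum, prediction)
--             ]
--     return predictions_sum
-- ===== SOURCE B (Python) =====
-- def sum_predictions(predictions, include_all=False):
--     filtered = [p for p in predictions if include_all or int(p[0])]
--     if not filtered:
--         return [0 for _ in range(9)]
--     columns = list(zip(*filtered))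
--     return [sum(int(x) for x in col) for col in columns][:9]
-- ===== Notes on version B (the rewrite author's own statement) =====
-- stated objective: alternative
-- what changed: Replaces the repeated row-by-row zip-and-add fold with a filter-then-transpose: included rows are collected once, transposed with zip(*...), and each column is summed, capped at 9 columns.
import Mathlib
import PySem

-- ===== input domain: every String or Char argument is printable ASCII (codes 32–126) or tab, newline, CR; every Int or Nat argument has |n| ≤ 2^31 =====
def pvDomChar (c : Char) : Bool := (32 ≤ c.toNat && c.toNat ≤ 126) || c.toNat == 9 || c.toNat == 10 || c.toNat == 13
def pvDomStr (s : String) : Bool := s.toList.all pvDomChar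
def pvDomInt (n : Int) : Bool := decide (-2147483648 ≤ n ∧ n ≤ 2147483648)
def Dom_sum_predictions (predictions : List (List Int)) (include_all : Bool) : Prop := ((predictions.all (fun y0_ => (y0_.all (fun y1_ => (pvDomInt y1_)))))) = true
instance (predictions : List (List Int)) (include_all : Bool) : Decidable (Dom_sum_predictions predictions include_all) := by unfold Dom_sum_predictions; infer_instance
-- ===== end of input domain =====

-- B replaces A's repeated zip-and-add fold by a filter-then-transpose column sum (objective: alternative).

-- ===== PORT A =====
-- shared filter predicate: `include_all or int(prediction[0])`; under Pre_ the index succeeds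
def pvPred (include_all : Bool) (p : List Int) : Bool :=
  include_all || decide (((PySem.List.pyGet? p 0).getD 0) ≠ 0)

def sum_predictions (predictions : List (List Int)) (include_all : Bool) : List Int :=
  predictions.foldl
    (fun predictions_sum prediction =>
      if pvPred include_all prediction then
        (predictions_sum.zip prediction).map (fun ab => ab.1 + ab.2)
      else predictions_sum)
    (List.replicate 9 0)

-- ===== PORT B =====
def sum_predictions_alt (predictions : List (List Int)) (include_all : Bool) : List Int :=
  let filtered := predictions.filter (pvPred include_all)
  match filtered with
  | [] => List.replicate 9 0
  | h :: t =>
      -- zip(*filtered): columns 0..L-1 where L is the minimum row length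
      let L := t.foldl (fun m p => min m p.length) h.length
      (((List.range L).map (fun j => ((h :: t).map (fun p => p.getD j 0)).sum)).take 9)

-- ===== PRECONDITION & SPEC =====
-- Pre_ excludes the inputs on which A raises IndexError: include_all false together with an
-- empty prediction row (A evaluates prediction[0] on every row when include_all is false).
def Pre_sum_predictions (predictions : List (List Int)) (include_all : Bool) : Prop :=
  include_all = true ∨ ∀ p ∈ predictions, p ≠ []
instance (predictions : List (List Int)) (include_all : Bool) : Decidable (Pre_sum_predictions predictions include_all) := by unfold Pre_sum_predictions; infer_instance
def pvWitness_sum_predictions : List (List Int) × Bool := ([[1, 2, 3], [0, 5], [1, 7, 8, 9]], false)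

def Spec_sum_predictions (predictions : List (List Int)) (include_all : Bool) (out : List Int) : Prop := out = sum_predictions_alt predictions include_all
instance (predictions : List (List Int)) (include_all : Bool) (out : List Int) : Decidable (Spec_sum_predictions predictions include_all out) := by unfold Spec_sum_predictions; infer_instance

-- ===== CLAIM (what is proved, stated in full; the proofs are below) =====
def Claim_equal_sum_predictions : Prop := ∀ (predictions : List (List Int)) (include_all : Bool), Dom_sum_predictions predictions include_all → Pre_sum_predictions predictions include_all → Spec_sum_predictions predictions include_all (sum_predictions predictions include_all)

-- ===== LEMMAS AND PROOFS =====

def pvZstep (acc p : List Int) : List Int := (acc.zip p).map (fun ab => ab.1 + ab.2)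

theorem pv_foldl_min_le (t : List (List Int)) (a : Nat) :
    t.foldl (fun m p => min m p.length) a ≤ a := by
  induction t generalizing a with
  | nil => simp
  | cons q t ih =>
      calc t.foldl (fun m p => min m p.length) (min a q.length) ≤ min a q.length := ih _
      _ ≤ a := Nat.min_le_left _ _

theorem pv_foldl_min_init (t : List (List Int)) (b a : Nat) :
    t.foldl (fun m p => min m p.length) (min b a) = min b (t.foldl (fun m p => min m p.length) a) := by
  induction t generalizing a with
  | nil => rfl
  | cons q t ih =>
      show t.foldl _ (min (min b a) q.length) = _
      rw [Nat.min_assoc, ih]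
      rfl

theorem pv_self_eq_range_map (l : List Int) :
    (List.range l.length).map (fun j => l.getD j 0) = l := by
  apply List.ext_getElem
  · simp
  · intro i h1 h2
    simp at h1
    simp [List.getD_eq_getElem?_getD, List.getElem?_eq_getElem h1]

theorem pv_zfold_char (fs : List (List Int)) (init : List Int) :
    fs.foldl pvZstep init =
      (List.range (fs.foldl (fun m p => min m p.length) init.length)).map
        (fun j => init.getD j 0 + (fs.map (fun p => p.getD j 0)).sum) := by
  induction fs generalizing init with
  | nil =>
      simp only [List.foldl_nil, List.map_nil, List.sum_nil, add_zero]
      exact (pv_self_eq_range_map init).symm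
  | cons p t ih =>
      show t.foldl pvZstep (pvZstep init p) = _
      rw [ih]
      have hlen : (pvZstep init p).length = min init.length p.length := by
        simp [pvZstep]
      rw [hlen]
      show _ = (List.range (t.foldl (fun m p => min m p.length) (min init.length p.length))).map _
      apply List.map_congr_left
      intro j hj
      rw [List.mem_range] at hj
      have hj' : j < min init.length p.length := lt_of_lt_of_le hj (pv_foldl_min_le _ _)
      have hji : j < init.length := lt_of_lt_of_le hj' (Nat.min_le_left _ _)
      have hjp : j < p.length := lt_of_lt_of_le hj' (Nat.min_le_right _ _)
      have hjz : j < (pvZstep init p).length := by rw [hlen]; exact hj'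
      have : (pvZstep init p).getD j 0 = init.getD j 0 + p.getD j 0 := by
        rw [List.getD_eq_getElem _ _ hjz, List.getD_eq_getElem _ _ hji, List.getD_eq_getElem _ _ hjp]
        simp [pvZstep]
      rw [this]
      simp [add_assoc]

theorem pv_A_eq_foldl_filter (predictions : List (List Int)) (include_all : Bool) :
    sum_predictions predictions include_all =
      (predictions.filter (pvPred include_all)).foldl pvZstep (List.replicate 9 0) := by
  unfold sum_predictions
  rw [List.foldl_filter]
  simp only [pvZstep]

-- ===== VERDICT (by name: the statement is the Claim_ definition above) =====
theorem sum_predictions_spec : Claim_equal_sum_predictions := by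
  intro predictions include_all _ _
  unfold Spec_sum_predictions sum_predictions_alt
  rw [pv_A_eq_foldl_filter]
  cases hf : predictions.filter (pvPred include_all) with
  | nil => simp
  | cons h t =>
      rw [pv_zfold_char]
      have hrep : ∀ j : Nat, (List.replicate 9 (0 : Int)).getD j 0 = 0 := by
        intro j
        rw [List.getD_eq_getElem?_getD, List.getElem?_replicate]
        split <;> simp
      simp only [hrep, zero_add]
      have : (List.replicate 9 (0 : Int)).length = 9 := by simp
      rw [this]
      show (List.range ((h :: t).foldl (fun m p => min m p.length) 9)).map _ = _
      have h9 : ((h :: t).foldl (fun m p => min m p.length) 9) =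
          min 9 (t.foldl (fun m p => min m p.length) h.length) := by
        show t.foldl _ (min 9 h.length) = _
        rw [pv_foldl_min_init]
      rw [h9, ← List.take_range, List.map_take]
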